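-- pv_equiv track=rewrite | github.com/Sujay-155/python_lab_1 | fourdigit6.py | find_sum_and_reverse
-- ===== SOURCE A (Python) =====
-- def find_sum_and_reverse(number):
--
--   sum_of_digits = 0
--   reverse_number = 0
--
--   while number > 0:
--     digit = number % 10
--     sum_of_digits += digit
--     reverse_number = reverse_number * 10 + digit
--     number //= 10
--
--   return sum_of_digits, reverse_number
-- ===== SOURCE B (Python) =====
-- def find_sum_and_reverse(number):
--     if number <= 0:
--         return 0, 0
--     digits = [ord(c) - 48 for c in str(number)]
--     reverse_number = 0
--     for d in reversed(digits):
--         reverse_number = reverse_number * 10 + d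
--     return sum(digits), reverse_number
-- ===== Notes on version B (the rewrite author's own statement) =====
-- stated objective: idiomatic
-- what changed: replaces the numeric %/// digit-peeling loop with a string conversion: str(number) is read once into a digit list, the sum is a single sum() and the reversal a fold over the reversed digit list
import Mathlib
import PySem

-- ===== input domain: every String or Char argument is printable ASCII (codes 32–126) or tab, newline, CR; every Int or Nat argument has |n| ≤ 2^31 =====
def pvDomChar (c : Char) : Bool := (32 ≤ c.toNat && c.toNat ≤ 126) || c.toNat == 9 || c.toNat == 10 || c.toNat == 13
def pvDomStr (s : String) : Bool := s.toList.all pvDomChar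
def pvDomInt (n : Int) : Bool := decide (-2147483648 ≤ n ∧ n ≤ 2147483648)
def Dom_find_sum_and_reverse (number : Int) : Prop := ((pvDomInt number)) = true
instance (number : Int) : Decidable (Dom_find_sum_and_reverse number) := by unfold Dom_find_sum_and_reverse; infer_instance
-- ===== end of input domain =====

-- B replaces A's numeric %-and-// digit-peeling loop with the idiomatic string form:
-- str(number) is read once into a digit list, summed with sum() and reversed with a fold.

-- ===== PORT A =====
-- the while loop of A, state (number, sum_of_digits, reverse_number)
def fsrLoop (number s r : Int) : Int × Int :=
  if h : 0 < number then
    fsrLoop (PySem.Int.floordiv number 10)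
      (s + PySem.Int.mod number 10)
      (r * 10 + PySem.Int.mod number 10)
  else (s, r)
termination_by number.toNat
decreasing_by
  rw [PySem.Int.floordiv_eq_ediv_of_pos (by norm_num)]
  omega

def find_sum_and_reverse (number : Int) : Int × Int := fsrLoop number 0 0

-- ===== PORT B =====
def find_sum_and_reverse_alt (number : Int) : Int × Int :=
  if number ≤ 0 then (0, 0)
  else
    -- [ord(c) - 48 for c in str(number)]
    let digits := (PySem.Int.toChars number).map (fun c => (c.toNat : Int) - 48)
    -- for d in reversed(digits): reverse_number = reverse_number * 10 + d
    let reverse_number := digits.reverse.foldl (fun r d => r * 10 + d) 0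
    (digits.sum, reverse_number)

-- ===== PRECONDITION & SPEC =====
def Spec_find_sum_and_reverse (number : Int) (out : Int × Int) : Prop := out = find_sum_and_reverse_alt number
instance (number : Int) (out : Int × Int) : Decidable (Spec_find_sum_and_reverse number out) := by unfold Spec_find_sum_and_reverse; infer_instance

-- ===== CLAIM (what is proved, stated in full; the proofs are below) =====
def Claim_equal_find_sum_and_reverse : Prop := ∀ (number : Int), Dom_find_sum_and_reverse number → Spec_find_sum_and_reverse number (find_sum_and_reverse number)

-- ===== LEMMAS AND PROOFS =====

-- Nat.toDigits 10, characterised through Nat.digits 10 (most-significant digit first)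
lemma toDigitsCore_eq_digits (fuel : Nat) : ∀ (n : Nat) (ds : List Char), n < fuel → 0 < n →
    Nat.toDigitsCore 10 fuel n ds = ((Nat.digits 10 n).map Nat.digitChar).reverse ++ ds := by
  induction fuel with
  | zero => intro n ds h _; omega
  | succ fuel ih =>
    intro n ds h hn
    rw [Nat.toDigitsCore]
    rw [Nat.digits_def' (by norm_num) hn]
    by_cases h10 : n / 10 = 0
    · simp [h10]
    · rw [if_neg h10, ih (n / 10) _ (by omega) (by omega)]
      simp

lemma toDigits_eq_digits (n : Nat) (hn : 0 < n) :
    Nat.toDigits 10 n = ((Nat.digits 10 n).map Nat.digitChar).reverse := by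
  rw [Nat.toDigits, toDigitsCore_eq_digits (n + 1) n [] (by omega) hn]
  simp

lemma digitChar_val (d : Nat) (hd : d < 10) : ((Nat.digitChar d).toNat : Int) - 48 = (d : Int) := by
  interval_cases d <;> decide

-- digit values of str(n), most-significant first
lemma toChars_vals (n : Nat) (hn : 0 < n) :
    (PySem.Int.toChars (n : Int)).map (fun c => (c.toNat : Int) - 48)
      = ((Nat.digits 10 n).map (fun d : Nat => (d : Int))).reverse := by
  rw [PySem.Int.toChars]
  rw [if_neg (by omega)]
  have : ((n : Int)).toNat = n := by omega
  rw [this, toDigits_eq_digits n hn, List.map_reverse, List.map_map]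
  congr 1
  apply List.map_congr_left
  intro d hd
  exact digitChar_val d (Nat.digits_lt_base (by norm_num) hd)

-- A's loop, characterised over Nat.digits (least-significant first)
lemma fsrLoop_eq (m : Nat) : ∀ (s r : Int),
    fsrLoop (m : Int) s r
      = (s + ((Nat.digits 10 m).map (fun d : Nat => (d : Int))).sum,
         (Nat.digits 10 m).foldl (fun r d => r * 10 + (d : Int)) r) := by
  induction m using Nat.strong_induction_on with
  | _ m ih =>
    intro s r
    rw [fsrLoop]
    by_cases hm : 0 < m
    · rw [dif_pos (by exact_mod_cast hm)]
      rw [Nat.digits_def' (b := 10) (by norm_num) hm]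
      have hdiv : PySem.Int.floordiv (m : Int) 10 = ((m / 10 : Nat) : Int) := by
        exact_mod_cast PySem.Int.floordiv_natCast m 10
      have hmod : PySem.Int.mod (m : Int) 10 = ((m % 10 : Nat) : Int) := by
        exact_mod_cast PySem.Int.mod_natCast m 10
      rw [hdiv, hmod, ih (m / 10) (Nat.div_lt_self hm (by norm_num))]
      simp [List.foldl_cons]
      ring_nf
    · rw [dif_neg (by exact_mod_cast hm)]
      have : m = 0 := by omega
      subst this
      simp

-- ===== VERDICT (by name: the statement is the Claim_ definition above) =====
theorem find_sum_and_reverse_spec : Claim_equal_find_sum_and_reverse := by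
  intro number _
  unfold Spec_find_sum_and_reverse find_sum_and_reverse find_sum_and_reverse_alt
  by_cases h : number ≤ 0
  · rw [if_pos h, fsrLoop, dif_neg (by omega)]
  · rw [if_neg h]
    have hn : 0 < number := by omega
    obtain ⟨m, rfl⟩ : ∃ m : Nat, number = (m : Int) := ⟨number.toNat, by omega⟩
    have hm : 0 < m := by exact_mod_cast hn
    simp only [toChars_vals m hm]
    rw [fsrLoop_eq m 0 0]
    simp [List.sum_reverse]
    congr 1
    induction (Nat.digits 10 m) <;> simp_all
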